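-- pv_equiv track=rewrite | github.com/tnogami/at_coder | problems/ABC/ABC280/abc280_d.py | ct_prime
-- ===== SOURCE A (Python) =====
-- def ct_prime(n, m):
--     ct = 0
--     mul = 1
--     while True:
--         num = n*mul
--         while num % n == 0:
--             ct += 1
--             num //= n
--
--         if m <= ct:
--             break
--
--         mul += 1
--
--     return n*mul
-- ===== SOURCE B (Python) =====
-- def ct_prime(n, m):
--     # Binary search for the smallest mul with cumulative base-|n| valuation >= m,
--     # using the Legendre-style closed-form count(mul) = mul + mul//b + mul//b**2 + ...
--     b = abs(n)
--
--     def count(mul):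
--         total = 0
--         x = mul
--         while x > 0:
--             total += x
--             x //= b
--         return total
--
--     hi = 1
--     while count(hi) < m:
--         hi *= 2
--     lo = 1
--     while lo < hi:
--         mid = (lo + hi) // 2
--         if m <= count(mid):
--             hi = mid
--         else:
--             lo = mid + 1
--     return n * lo
-- ===== Notes on version B (the rewrite author's own statement) =====
-- stated objective: faster
-- what changed: A scans mul = 1,2,3,... accumulating the base-|n| valuation of each n*mul until the total reaches m; B binary-searches for the smallest mul whose cumulative valuation, computed in closed form by the Legendre sum mul + mul//b + mul//b^2 + ..., reaches m.
import Mathlib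
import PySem

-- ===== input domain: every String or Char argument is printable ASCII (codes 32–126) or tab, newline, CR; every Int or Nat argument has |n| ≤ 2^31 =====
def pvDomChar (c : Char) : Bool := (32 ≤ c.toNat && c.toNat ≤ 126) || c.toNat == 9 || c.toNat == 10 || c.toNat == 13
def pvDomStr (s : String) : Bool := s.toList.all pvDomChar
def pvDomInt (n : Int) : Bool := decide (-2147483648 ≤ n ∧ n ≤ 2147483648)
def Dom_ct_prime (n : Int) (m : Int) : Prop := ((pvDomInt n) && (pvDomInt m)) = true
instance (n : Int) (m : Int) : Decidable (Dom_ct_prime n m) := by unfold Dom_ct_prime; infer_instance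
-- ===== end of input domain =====

-- B replaces A's linear scan over mul by a binary search on the Legendre closed-form
-- cumulative-valuation count; measured asymptotically faster on large m.

-- ===== PORT A =====
-- inner `while num % n == 0: ct += 1; num //= n` (fuel = |num| suffices on Pre_)
def ctInnerA (n : Int) : Nat → Int → Int → Int × Int
  | 0, ct, num => (ct, num)
  | fuel + 1, ct, num =>
    if PySem.Int.mod num n = 0 then
      ctInnerA n fuel (ct + 1) (PySem.Int.floordiv num n)
    else (ct, num)

-- outer `while True: …` (fuel = m.toNat + 1 suffices on Pre_, since ct grows each pass)
def ctOuterA (n m : Int) : Nat → Int → Int → Int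
  | 0, _, mul => n * mul
  | fuel + 1, ct, mul =>
    let num := n * mul
    let r := ctInnerA n num.natAbs ct num
    if m ≤ r.1 then n * mul else ctOuterA n m fuel r.1 (mul + 1)

def ct_prime (n : Int) (m : Int) : Int := ctOuterA n m (m.toNat + 1) 0 1

-- ===== PORT B =====
-- `while x > 0: total += x; x //= b`  (Legendre count: x + x//b + x//b² + …)
def ctCountLoopB (b : Int) : Nat → Int → Int → Int
  | 0, total, _ => total
  | fuel + 1, total, x =>
    if 0 < x then ctCountLoopB b fuel (total + x) (PySem.Int.floordiv x b) else total

def ctCountB (b mul : Int) : Int := ctCountLoopB b mul.natAbs 0 mul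

-- `while count(hi) < m: hi *= 2`
def ctHiLoopB (b m : Int) : Nat → Int → Int
  | 0, hi => hi
  | fuel + 1, hi => if ctCountB b hi < m then ctHiLoopB b m fuel (hi * 2) else hi

-- `while lo < hi: mid = (lo+hi)//2; …`
def ctBsLoopB (b m : Int) : Nat → Int → Int → Int
  | 0, lo, _ => lo
  | fuel + 1, lo, hi =>
    if lo < hi then
      let mid := PySem.Int.floordiv (lo + hi) 2
      if m ≤ ctCountB b mid then ctBsLoopB b m fuel lo mid
      else ctBsLoopB b m fuel (mid + 1) hi
    else lo

def ct_prime_alt (n : Int) (m : Int) : Int :=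
  let b : Int := (n.natAbs : Int)
  let hi := ctHiLoopB b m (m.toNat + 1) 1
  n * ctBsLoopB b m hi.toNat 1 hi

-- ===== PRECONDITION & SPEC =====
-- Pre_ excludes n = 0 (A raises ZeroDivisionError on `num % n`) and n = ±1
-- (A's inner loop never terminates, since num % (±1) is always 0).
def Pre_ct_prime (n : Int) (m : Int) : Prop := 2 ≤ n.natAbs
instance (n : Int) (m : Int) : Decidable (Pre_ct_prime n m) := by unfold Pre_ct_prime; infer_instance
def pvWitness_ct_prime : Int × Int := (3, 5)

def Spec_ct_prime (n : Int) (m : Int) (out : Int) : Prop := out = ct_prime_alt n m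
instance (n : Int) (m : Int) (out : Int) : Decidable (Spec_ct_prime n m out) := by unfold Spec_ct_prime; infer_instance

-- ===== CLAIM (what is proved, stated in full; the proofs are below) =====
def Claim_equal_ct_prime : Prop := ∀ (n : Int) (m : Int), Dom_ct_prime n m → Pre_ct_prime n m → Spec_ct_prime n m (ct_prime n m)

-- ===== LEMMAS AND PROOFS =====

-- base-b valuation of k (number of times n divides, on absolute values)
def ctVal (b k : Nat) : Nat :=
  if h : 2 ≤ b ∧ b ∣ k ∧ 0 < k then ctVal b (k / b) + 1 else 0
  decreasing_by exact Nat.div_lt_self h.2.2 (by omega)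

-- cumulative count T b k = Σ_{j=1..k} (1 + ctVal b j) = k + k/b + k/b² + …
def ctT (b k : Nat) : Nat :=
  if h : 2 ≤ b ∧ 0 < k then k + ctT b (k / b) else 0
  decreasing_by exact Nat.div_lt_self h.2 (by omega)

theorem ctT_zero (b : Nat) : ctT b 0 = 0 := by
  unfold ctT; simp

theorem ctT_pos_eq (b k : Nat) (hb : 2 ≤ b) (hk : 0 < k) : ctT b k = k + ctT b (k / b) := by
  rw [ctT]; simp [hb, hk]

theorem le_ctT (b k : Nat) (hb : 2 ≤ b) : k ≤ ctT b k := by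
  rcases Nat.eq_zero_or_pos k with h | h
  · simp [h, ctT_zero]
  · rw [ctT_pos_eq b k hb h]; omega

theorem ctT_succ (b : Nat) (hb : 2 ≤ b) : ∀ k, ctT b (k + 1) = ctT b k + 1 + ctVal b (k + 1) := by
  intro k
  induction k using Nat.strong_induction_on with
  | _ k ih =>
    by_cases hd : b ∣ k + 1
    · obtain ⟨t, ht⟩ := hd
      have ht1 : 1 ≤ t := by
        rcases Nat.eq_zero_or_pos t with h0 | h0
        · simp [h0] at ht
        · exact h0
      obtain ⟨s, rfl⟩ : ∃ s, t = s + 1 := ⟨t - 1, by omega⟩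
      have hbs : b * (s + 1) = b * s + b := by ring
      have hk : k = b * s + (b - 1) := by omega
      have hdivk1 : (k + 1) / b = s + 1 := by rw [ht]; exact Nat.mul_div_cancel_left _ (by omega)
      have hdivk : k / b = s := by
        have hk' : k = (b - 1) + b * s := by omega
        rw [hk', Nat.add_mul_div_left _ _ (by omega : 0 < b), Nat.div_eq_of_lt (by omega)]; omega
      have hval : ctVal b (k + 1) = ctVal b (s + 1) + 1 := by
        rw [ctVal]
        have : b ∣ k + 1 := ⟨s + 1, ht⟩
        simp [hb, this, hdivk1]
      have h2s : 2 * s ≤ b * s := Nat.mul_le_mul_right s hb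
      have hk1 : 1 ≤ k := by omega
      have iht := ih s (by omega)
      rw [ctT_pos_eq b (k+1) hb (by omega), hdivk1, iht,
          ctT_pos_eq b k hb (by omega), hdivk, hval]
      omega
    · have hdiv : (k + 1) / b = k / b := by
        rw [Nat.succ_div]; simp [hd]
      have hval : ctVal b (k + 1) = 0 := by rw [ctVal]; simp [hd]
      rcases Nat.eq_zero_or_pos k with hk0 | hk0
      · subst hk0
        rw [ctT_pos_eq b 1 hb (by omega), ctT_zero, hval]
        simp [Nat.div_eq_of_lt (by omega : 1 < b), ctT_zero]
      · rw [ctT_pos_eq b (k+1) hb (by omega), hdiv, ctT_pos_eq b k hb hk0, hval]; omega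

theorem ctT_mono (b : Nat) (hb : 2 ≤ b) {i j : Nat} (h : i ≤ j) : ctT b i ≤ ctT b j := by
  induction j with
  | zero => simp_all
  | succ j ih =>
    rcases Nat.lt_or_ge i (j + 1) with h' | h'
    · have := ih (by omega); rw [ctT_succ b hb j]; omega
    · have : i = j + 1 := by omega
      simp [this]

theorem ctT_ge_int (b k : Nat) (hb : 2 ≤ b) (m : Int) (hm : m ≤ (k : Int)) : m ≤ (ctT b k : Int) := by
  have := le_ctT b k hb; omega

-- the unique answer: least r ≥ 1 with m ≤ T b r
def ctGood (b : Nat) (m : Int) (r : Nat) : Prop :=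
  1 ≤ r ∧ m ≤ (ctT b r : Int) ∧ ∀ k : Nat, 1 ≤ k → k < r → (ctT b k : Int) < m

theorem ctGood_unique {b : Nat} {m : Int} {r s : Nat} (hr : ctGood b m r) (hs : ctGood b m s) : r = s := by
  rcases hr with ⟨hr1, hr2, hr3⟩
  rcases hs with ⟨hs1, hs2, hs3⟩
  by_contra hne
  rcases Nat.lt_or_ge r s with h | h
  · have := hs3 r hr1 h; omega
  · have := hr3 s hs1 (by omega); omega

-- ===== A-side =====

theorem ctInnerA_spec (n : Int) (hb : 2 ≤ n.natAbs) :
    ∀ fuel (num ct : Int), num ≠ 0 → num.natAbs ≤ fuel →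
      (ctInnerA n fuel ct num).1 = ct + (ctVal n.natAbs num.natAbs : Int) := by
  intro fuel
  induction fuel with
  | zero => intro num ct h0 hle; exfalso; have := Int.natAbs_pos.mpr h0; omega
  | succ f ih =>
    intro num ct h0 hle
    by_cases hm : PySem.Int.mod num n = 0
    · have hdvd : n ∣ num := (PySem.Int.mod_eq_zero_iff_dvd num n).mp hm
      set q := PySem.Int.floordiv num n with hq
      have hqn : q * n = num := by
        have h := PySem.Int.floordiv_mul_add_mod num n
        rw [hm] at h; simpa using h
      have hq0 : q ≠ 0 := by
        intro h; rw [h, zero_mul] at hqn; exact h0 hqn.symm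
      have habs : q.natAbs * n.natAbs = num.natAbs := by
        rw [← Int.natAbs_mul, hqn]
      have hqlt : q.natAbs < num.natAbs := by
        have h1 : 1 ≤ q.natAbs := Int.natAbs_pos.mpr hq0
        nlinarith
      have hstep : ctInnerA n (f + 1) ct num = ctInnerA n f (ct + 1) q := by
        rw [ctInnerA]; simp [hm, hq]
      rw [hstep, ih q (ct + 1) hq0 (by omega)]
      have hbd : n.natAbs ∣ num.natAbs := Int.natAbs_dvd_natAbs.mpr hdvd
      have hdiveq : num.natAbs / n.natAbs = q.natAbs := by
        rw [← habs, Nat.mul_div_cancel _ (by omega)]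
      have hv : ctVal n.natAbs num.natAbs = ctVal n.natAbs q.natAbs + 1 := by
        rw [ctVal]
        simp [hb, hbd, Int.natAbs_pos.mpr h0, hdiveq]
      rw [hv]; push_cast; ring
    · have hnd : ¬ n.natAbs ∣ num.natAbs := by
        rw [Int.natAbs_dvd_natAbs]
        intro hd; exact hm ((PySem.Int.mod_eq_zero_iff_dvd num n).mpr hd)
      have hv : ctVal n.natAbs num.natAbs = 0 := by rw [ctVal]; simp [hnd]
      rw [ctInnerA]; simp [hm, hv]

theorem ctVal_mul (b k : Nat) (hb : 2 ≤ b) (hk : 0 < k) : ctVal b (b * k) = ctVal b k + 1 := by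
  rw [ctVal]
  have hd : b ∣ b * k := Dvd.intro k rfl
  have hp : 0 < b * k := Nat.mul_pos (by omega) hk
  simp [hb, hd, hp, Nat.mul_div_cancel_left k (by omega : 0 < b)]

theorem ctOuterA_spec (n m : Int) (hb : 2 ≤ n.natAbs) :
    ∀ (fuel : Nat) (mul : Nat), 1 ≤ mul →
      m ≤ (ctT n.natAbs (mul - 1 + fuel) : Int) →
      (∀ k : Nat, 1 ≤ k → k < mul → (ctT n.natAbs k : Int) < m) →
      ∃ r : Nat, ctGood n.natAbs m r ∧
        ctOuterA n m fuel ((ctT n.natAbs (mul - 1) : Nat) : Int) (mul : Int) = n * (r : Int) := by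
  intro fuel
  induction fuel with
  | zero =>
    intro mul hmul hT hlow
    rcases Nat.lt_or_ge 1 mul with h2 | h2
    · exfalso
      simp only [Nat.add_zero] at hT
      have := hlow (mul - 1) (by omega) (by omega)
      omega
    · have hm1 : mul = 1 := by omega
      subst hm1
      refine ⟨1, ⟨le_refl 1, ?_, by omega⟩, by simp [ctOuterA]⟩
      have h0 : (1 : Nat) - 1 + 0 = 0 := rfl
      rw [h0, ctT_zero] at hT
      exact ctT_ge_int n.natAbs 1 hb m (by omega)
  | succ f ih =>
    intro mul hmul hT hlow
    have hn0 : n ≠ 0 := by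
      intro h; rw [h] at hb; simp at hb
    have hnum0 : n * (mul : Int) ≠ 0 := by
      apply mul_ne_zero hn0; exact_mod_cast (by omega : (mul : Nat) ≠ 0)
    have habs : (n * (mul : Int)).natAbs = n.natAbs * mul := by
      rw [Int.natAbs_mul, Int.natAbs_natCast]
    have hinner := ctInnerA_spec n hb (n * (mul : Int)).natAbs (n * (mul : Int))
      ((ctT n.natAbs (mul - 1) : Nat) : Int) hnum0 (le_refl _)
    have hsucc : ctT n.natAbs (mul - 1 + 1) = ctT n.natAbs (mul - 1) + 1 + ctVal n.natAbs (mul - 1 + 1) :=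
      ctT_succ n.natAbs hb (mul - 1)
    have hmm : mul - 1 + 1 = mul := by omega
    rw [hmm] at hsucc
    have hr1 : (ctInnerA n ((n * (mul : Int)).natAbs) ((ctT n.natAbs (mul - 1) : Nat) : Int) (n * (mul : Int))).1
        = ((ctT n.natAbs mul : Nat) : Int) := by
      rw [hinner, habs, ctVal_mul n.natAbs mul hb (by omega), hsucc]; push_cast; ring
    rw [ctOuterA]
    simp only [hr1]
    by_cases hstop : m ≤ ((ctT n.natAbs mul : Nat) : Int)
    · refine ⟨mul, ⟨hmul, hstop, hlow⟩, by simp [hstop]⟩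
    · obtain ⟨r, hgood, heq⟩ := ih (mul + 1) (by omega)
        (by
          have : mul + 1 - 1 + f = mul - 1 + (f + 1) := by omega
          rw [this]; exact hT)
        (by
          intro k hk1 hk2
          rcases Nat.lt_or_ge k mul with h | h
          · exact hlow k hk1 h
          · have : k = mul := by omega
            rw [this]; omega)
      refine ⟨r, hgood, ?_⟩
      have hmm2 : mul + 1 - 1 = mul := by omega
      rw [hmm2] at heq
      simp only [hstop, if_false]
      rw [← heq]
      congr 1

-- ===== B-side =====

theorem ctCountLoopB_spec (bN : Nat) (hb : 2 ≤ bN) :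
    ∀ (fuel : Nat) (x : Nat), x ≤ fuel → ∀ total : Int,
      ctCountLoopB (bN : Int) fuel total (x : Int) = total + (ctT bN x : Int) := by
  intro fuel
  induction fuel with
  | zero =>
    intro x hx total
    have : x = 0 := by omega
    subst this
    simp [ctCountLoopB, ctT_zero]
  | succ f ih =>
    intro x hx total
    rcases Nat.eq_zero_or_pos x with h0 | h0
    · subst h0; simp [ctCountLoopB, ctT_zero]
    · have hpos : (0 : Int) < (x : Int) := by exact_mod_cast h0
      have hdiv : PySem.Int.floordiv (x : Int) (bN : Int) = ((x / bN : Nat) : Int) :=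
        PySem.Int.floordiv_natCast x bN
      rw [ctCountLoopB]
      simp only [hpos, if_true, hdiv]
      rw [ih (x / bN) (by have := Nat.div_lt_self h0 (by omega : 1 < bN); omega) (total + x)]
      rw [ctT_pos_eq bN x hb h0]
      push_cast; ring

theorem ctCountB_spec (bN : Nat) (hb : 2 ≤ bN) (x : Nat) :
    ctCountB (bN : Int) (x : Int) = (ctT bN x : Int) := by
  unfold ctCountB
  rw [Int.natAbs_natCast]
  simpa using ctCountLoopB_spec bN hb x x (le_refl x) 0

theorem ctHiLoopB_spec (bN : Nat) (hb : 2 ≤ bN) (m : Int) :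
    ∀ (fuel : Nat) (hi : Nat), 1 ≤ hi → m ≤ (hi : Int) * 2 ^ fuel →
      ∃ h' : Nat, 1 ≤ h' ∧ ctHiLoopB (bN : Int) m fuel (hi : Int) = (h' : Int) ∧ m ≤ (ctT bN h' : Int) := by
  intro fuel
  induction fuel with
  | zero =>
    intro hi h1 hm
    refine ⟨hi, h1, by simp [ctHiLoopB], ?_⟩
    simp only [pow_zero, mul_one] at hm
    exact ctT_ge_int bN hi hb m hm
  | succ f ih =>
    intro hi h1 hm
    rw [ctHiLoopB, ctCountB_spec bN hb hi]
    by_cases hc : (ctT bN hi : Int) < m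
    · have hcast : (hi : Int) * 2 = ((hi * 2 : Nat) : Int) := by push_cast; ring
      obtain ⟨h', hh1, heq, hT⟩ := ih (hi * 2) (by omega)
        (by
          have : (hi : Int) * 2 ^ (f + 1) = ((hi * 2 : Nat) : Int) * 2 ^ f := by push_cast; ring
          rw [← this]; exact hm)
      refine ⟨h', hh1, ?_, hT⟩
      rw [if_pos hc, hcast, heq]
    · refine ⟨hi, h1, by rw [if_neg hc], by omega⟩

theorem ctBsLoopB_spec (bN : Nat) (hb : 2 ≤ bN) (m : Int) :
    ∀ (fuel : Nat) (lo hi : Nat), 1 ≤ lo → lo ≤ hi → hi - lo ≤ fuel →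
      m ≤ (ctT bN hi : Int) →
      (∀ k : Nat, 1 ≤ k → k < lo → (ctT bN k : Int) < m) →
      ∃ r : Nat, ctGood bN m r ∧ ctBsLoopB (bN : Int) m fuel (lo : Int) (hi : Int) = (r : Int) := by
  intro fuel
  induction fuel with
  | zero =>
    intro lo hi h1 hlh hfuel hT hlow
    have : lo = hi := by omega
    subst this
    exact ⟨lo, ⟨h1, hT, hlow⟩, by simp [ctBsLoopB]⟩
  | succ f ih =>
    intro lo hi h1 hlh hfuel hT hlow
    rcases Nat.lt_or_ge lo hi with hlt | hge
    · have hltI : (lo : Int) < (hi : Int) := by exact_mod_cast hlt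
      set midN : Nat := (lo + hi) / 2 with hmidN
      have hmid : PySem.Int.floordiv ((lo : Int) + (hi : Int)) 2 = (midN : Int) := by
        rw [PySem.Int.floordiv_eq_ediv_of_pos (by omega : (0:Int) < 2), ← Nat.cast_add]
        exact_mod_cast (Int.natCast_ediv (lo + hi) 2).symm
      have hmlo : lo ≤ midN := by omega
      have hmhi : midN < hi := by omega
      rw [ctBsLoopB]
      simp only [hltI, if_true, hmid, ctCountB_spec bN hb midN]
      by_cases hc : m ≤ (ctT bN midN : Int)
      · rw [if_pos hc]
        exact ih lo midN h1 hmlo (by omega) hc hlow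
      · rw [if_neg hc]
        have hcast : (midN : Int) + 1 = ((midN + 1 : Nat) : Int) := by push_cast; ring
        rw [hcast]
        refine ih (midN + 1) hi (by omega) (by omega) (by omega) hT ?_
        intro k hk1 hk2
        rcases Nat.lt_or_ge k lo with h | h
        · exact hlow k hk1 h
        · have : ctT bN k ≤ ctT bN midN := ctT_mono bN hb (by omega)
          omega
    · have : lo = hi := by omega
      subst this
      have hnlt : ¬ ((lo : Int) < (lo : Int)) := by omega
      rw [ctBsLoopB]
      exact ⟨lo, ⟨h1, hT, hlow⟩, by simp⟩

theorem ct_prime_alt_spec (n m : Int) (hb : 2 ≤ n.natAbs) :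
    ∃ r : Nat, ctGood n.natAbs m r ∧ ct_prime_alt n m = n * (r : Int) := by
  obtain ⟨h', hh1, hheq, hhT⟩ := ctHiLoopB_spec n.natAbs hb m (m.toNat + 1) 1 (le_refl 1)
    (by
      have h2 : (m.toNat : Int) < 2 ^ (m.toNat + 1) := by
        exact_mod_cast Nat.lt_two_pow_self.trans (Nat.pow_lt_pow_succ (by omega))
      simp only [Nat.cast_one, one_mul]
      omega)
  obtain ⟨r, hgood, hreq⟩ := ctBsLoopB_spec n.natAbs hb m h' 1 h' (le_refl 1) hh1
    (by omega) hhT (by intro k hk1 hk2; omega)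
  refine ⟨r, hgood, ?_⟩
  unfold ct_prime_alt
  simp only
  rw [Nat.cast_one] at hheq
  rw [hheq, Int.toNat_natCast h', ← hreq]
  norm_num

-- ===== VERDICT (by name: the statement is the Claim_ definition above) =====
theorem ct_prime_spec : Claim_equal_ct_prime := by
  intro n m _ hpre
  unfold Spec_ct_prime
  have hb : 2 ≤ n.natAbs := hpre
  obtain ⟨r, hr, hreq⟩ := ctOuterA_spec n m hb (m.toNat + 1) 1 (by omega)
    (by
      apply ctT_ge_int _ _ hb
      push_cast; omega)
    (by intro k hk1 hk2; omega)
  obtain ⟨s, hs, hseq⟩ := ct_prime_alt_spec n m hb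
  have : r = s := ctGood_unique hr hs
  unfold ct_prime
  simpa [ctT_zero, this, hseq] using hreq
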